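-- pv_equiv track=rewrite | github.com/AURIN-OFFICE/AusUrbHI | scripts/cleansing/2016_to_2021_concordance/scripts/population_csv_generator.py | create_sa2_population_dict
-- ===== SOURCE A (Python) =====
-- def create_sa2_population_dict(sa1_population_dict, sa1_in_sa2_dict):
--     sa2_population_dict = {}
--     for sa2_code, sa1_codes in sa1_in_sa2_dict.items():
--         total_population = 0
--         for sa1_code in sa1_codes:
--             total_population += sa1_population_dict.get(sa1_code, 0)
--         sa2_population_dict[sa2_code] = total_population
--     return sa2_population_dict
-- ===== SOURCE B (Python) =====
-- def create_sa2_population_dict(sa1_population_dict, sa1_in_sa2_dict):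
--     # Scatter instead of gather: build a reverse index sa1 -> [sa2, ...] and a
--     # zero-initialized result, then make one pass over the population entries.
--     sa2_population_dict = {}
--     reverse = {}
--     for sa2_code, sa1_codes in sa1_in_sa2_dict.items():
--         sa2_population_dict[sa2_code] = 0
--         for sa1_code in sa1_codes:
--             reverse.setdefault(sa1_code, []).append(sa2_code)
--     for sa1_code, population in sa1_population_dict.items():
--         for sa2_code in reverse.get(sa1_code, ()):
--             sa2_population_dict[sa2_code] += population
--     return sa2_population_dict
-- ===== Notes on version B (the rewrite author's own statement) =====
-- stated objective: alternative
-- what changed: Replaces the per-SA2 gather (summing dict.get lookups over each group) by a reverse index sa1->list of sa2 codes plus a zero-initialized result, then a single scatter pass over the population entries adding each population to all containing SA2 totals.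
import Mathlib
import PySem

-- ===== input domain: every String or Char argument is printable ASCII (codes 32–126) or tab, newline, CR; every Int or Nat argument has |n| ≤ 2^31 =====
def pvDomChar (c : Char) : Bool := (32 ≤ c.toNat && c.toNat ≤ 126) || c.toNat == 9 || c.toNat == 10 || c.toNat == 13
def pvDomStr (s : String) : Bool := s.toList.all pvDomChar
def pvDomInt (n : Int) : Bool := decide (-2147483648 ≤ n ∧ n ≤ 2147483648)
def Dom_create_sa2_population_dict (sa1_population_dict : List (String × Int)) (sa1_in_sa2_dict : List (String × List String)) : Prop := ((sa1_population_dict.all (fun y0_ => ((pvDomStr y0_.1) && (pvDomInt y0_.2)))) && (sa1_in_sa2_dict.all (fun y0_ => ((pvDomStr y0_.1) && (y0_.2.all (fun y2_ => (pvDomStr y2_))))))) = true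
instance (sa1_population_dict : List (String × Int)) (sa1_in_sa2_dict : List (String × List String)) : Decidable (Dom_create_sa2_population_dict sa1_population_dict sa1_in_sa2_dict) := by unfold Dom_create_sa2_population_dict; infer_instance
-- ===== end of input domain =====

-- B replaces A's per-SA2 gather by a reverse index sa1 → [sa2,…] plus one scatter pass
-- over the population entries (alternative decomposition, same asymptotic cost).

-- ===== PORT A =====
def create_sa2_population_dict (sa1_population_dict : List (String × Int)) (sa1_in_sa2_dict : List (String × List String)) : List (String × Int) :=
  let popD : PySem.Dict String Int := PySem.Dict.ofList sa1_population_dict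
  let grpD : PySem.Dict String (List String) := PySem.Dict.ofList sa1_in_sa2_dict
  (grpD.items.foldl
      (fun d g => d.insert g.1 (g.2.foldl (fun t s => t + popD.getD s 0) 0))
      PySem.Dict.empty).items

-- ===== PORT B =====
def create_sa2_population_dict_alt (sa1_population_dict : List (String × Int)) (sa1_in_sa2_dict : List (String × List String)) : List (String × Int) :=
  let popD : PySem.Dict String Int := PySem.Dict.ofList sa1_population_dict
  let grpD : PySem.Dict String (List String) := PySem.Dict.ofList sa1_in_sa2_dict
  -- first loop: zero-initialized result dict and reverse index (setdefault+append = modify with [] default)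
  let st := grpD.items.foldl
      (fun (st : PySem.Dict String Int × PySem.Dict String (List String)) g =>
        (st.1.insert g.1 0,
         g.2.foldl (fun r s => r.modify s [] (· ++ [g.1])) st.2))
      (PySem.Dict.empty, PySem.Dict.empty)
  -- scatter pass; 'd[k] += p' ported as modify (exact: k is always a present key here)
  (popD.items.foldl
      (fun d q => (st.2.getD q.1 []).foldl (fun d k => d.modify k 0 (· + q.2)) d)
      st.1).items

-- ===== PRECONDITION & SPEC =====
def Spec_create_sa2_population_dict (sa1_population_dict : List (String × Int)) (sa1_in_sa2_dict : List (String × List String)) (out : List (String × Int)) : Prop := out = create_sa2_population_dict_alt sa1_population_dict sa1_in_sa2_dict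
instance (sa1_population_dict : List (String × Int)) (sa1_in_sa2_dict : List (String × List String)) (out : List (String × Int)) : Decidable (Spec_create_sa2_population_dict sa1_population_dict sa1_in_sa2_dict out) := by unfold Spec_create_sa2_population_dict; infer_instance

-- ===== CLAIM (what is proved, stated in full; the proofs are below) =====
def Claim_equal_create_sa2_population_dict : Prop := ∀ (sa1_population_dict : List (String × Int)) (sa1_in_sa2_dict : List (String × List String)), Dom_create_sa2_population_dict sa1_population_dict sa1_in_sa2_dict → Spec_create_sa2_population_dict sa1_population_dict sa1_in_sa2_dict (create_sa2_population_dict sa1_population_dict sa1_in_sa2_dict)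

-- ===== LEMMAS AND PROOFS =====

theorem pvSum_map_add {a : Type} (l : List a) (f g : a -> Int) :
    (l.map (fun x => f x + g x)).sum = (l.map f).sum + (l.map g).sum := by
  induction l with
  | nil => simp
  | cons x t ih => simp [ih]; ring

theorem pvSum_map_ite (codes : List String) (k : String) (v : Int) :
    (codes.map (fun s => if k == s then v else 0)).sum = v * (codes.count k : Int) := by
  induction codes with
  | nil => simp
  | cons c cs ih =>
    simp only [List.map_cons, List.sum_cons, ih, List.count_cons]
    by_cases h : k = c
    · subst h; simp; ring
    · have h' : (k == c) = false := by simp [h]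
      simp [h', beq_eq_false_iff_ne.mpr (Ne.symm h)]

-- map-filter of a constant-tagged list is a replicate of the count
theorem pvFilter_tag (l : List String) (a s : String) :
    ((l.map (fun x => (x, a))).filter (fun p => p.1 == s)).map (fun p => p.2)
      = List.replicate (l.count s) a := by
  induction l with
  | nil => simp
  | cons x t ih =>
    simp only [List.map_cons, List.filter_cons, List.count_cons]
    by_cases h : x = s
    · subst h
      simp [ih, List.replicate_succ]
    · simp [h, ih]

-- the reverse index: rev.getD s [] lists each sa2 code once per occurrence of s in its group
theorem pvRev_getD (G : List (String × List String)) (r : PySem.Dict String (List String)) (s : String) :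
    (G.foldl (fun r g => g.2.foldl (fun r s => r.modify s [] (· ++ [g.1])) r) r).getD s []
      = r.getD s [] ++ G.flatMap (fun g => List.replicate (g.2.count s) g.1) := by
  induction G generalizing r with
  | nil => simp
  | cons g G ih =>
    rw [List.foldl_cons, ih]
    have hstep : (g.2.foldl (fun r x => r.modify x [] (· ++ [g.1])) r).getD s []
        = r.getD s [] ++ List.replicate (g.2.count s) g.1 := by
      rw [← List.foldl_map (f := fun x => (x, g.1))
            (g := fun (d : PySem.Dict String (List String)) (p : String × String) => d.modify p.1 [] (· ++ [p.2])),
          PySem.Dict.getD_foldl_modify_append, pvFilter_tag]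
    rw [hstep]
    simp [List.append_assoc]

-- one scatter over a key list: adds p once per occurrence
theorem pvScatter_getD (ks : List String) (d : PySem.Dict String Int) (p : Int) (x : String) :
    (ks.foldl (fun d k => d.modify k 0 (· + p)) d).getD x 0 = d.getD x 0 + p * (ks.count x : Int) := by
  induction ks generalizing d with
  | nil => simp
  | cons k ks ih =>
    rw [List.foldl_cons, ih, PySem.Dict.getD_modify, List.count_cons]
    by_cases h : x = k
    · subst h; simp; ring
    · simp [if_neg h, beq_eq_false_iff_ne.mpr (Ne.symm h)]

-- scatter keeps the key list when all touched keys are present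
theorem pvScatter_keys (ks : List String) (d : PySem.Dict String Int) (p : Int)
    (h : ∀ k ∈ ks, k ∈ d.keys) :
    (ks.foldl (fun d k => d.modify k 0 (· + p)) d).keys = d.keys := by
  rw [PySem.Dict.keys_foldl_modify, PySem.Set.update_eq_append_filter]
  have hnil : ((PySem.Set.ofList ks).filter (fun y => !(PySem.Set.contains d.keys y))) = [] := by
    apply List.filter_eq_nil_iff.mpr
    intro y hy
    have hyk : y ∈ ks := (PySem.Set.mem_ofList ks y).mp hy
    simp
    exact h y hyk
  rw [hnil, List.append_nil]

-- whole scatter loop over the population items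
theorem pvScatterAll_getD (P : List (String × Int)) (rev : PySem.Dict String (List String))
    (d : PySem.Dict String Int) (x : String) :
    (P.foldl (fun d q => (rev.getD q.1 []).foldl (fun d k => d.modify k 0 (· + q.2)) d) d).getD x 0
      = d.getD x 0 + (P.map (fun q => q.2 * (((rev.getD q.1 []).count x : Nat) : Int))).sum := by
  induction P generalizing d with
  | nil => simp
  | cons q P ih =>
    rw [List.foldl_cons, ih, pvScatter_getD]
    simp [add_assoc]

theorem pvScatterAll_keys (P : List (String × Int)) (rev : PySem.Dict String (List String))
    (d : PySem.Dict String Int)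
    (h : ∀ q ∈ P, ∀ k ∈ rev.getD q.1 [], k ∈ d.keys) :
    (P.foldl (fun d q => (rev.getD q.1 []).foldl (fun d k => d.modify k 0 (· + q.2)) d) d).keys = d.keys := by
  induction P generalizing d with
  | nil => rfl
  | cons q P ih =>
    have hk := pvScatter_keys (rev.getD q.1 []) d q.2 (h q (List.mem_cons_self))
    have h' : ∀ q' ∈ P, ∀ k ∈ rev.getD q'.1 [],
        k ∈ ((rev.getD q.1 []).foldl (fun d k => d.modify k 0 (· + q.2)) d).keys := by
      intro q' hq' k hkm
      rw [hk]; exact h q' (List.mem_cons_of_mem _ hq') k hkm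
    rw [List.foldl_cons, ih _ h', hk]

-- counting a key in the flattened reverse contributions = counting s in that key's own group
theorem pvCount_flatMap (G : List (String × List String)) (g : String × List String) (s : String)
    (hnd : (G.map (fun g => g.1)).Nodup) (hg : g ∈ G) :
    (G.flatMap (fun g' => List.replicate (g'.2.count s) g'.1)).count g.1 = g.2.count s := by
  induction G with
  | nil => cases hg
  | cons h t ih =>
    simp only [List.map_cons, List.nodup_cons] at hnd
    rw [List.flatMap_cons, List.count_append]
    rcases List.mem_cons.mp hg with rfl | hgt
    · have h0 : (t.flatMap (fun g' => List.replicate (g'.2.count s) g'.1)).count g.1 = 0 := by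
        apply List.count_eq_zero.mpr
        intro hm
        rcases List.mem_flatMap.mp hm with ⟨g', hg', hrep⟩
        have : g.1 = g'.1 := (List.eq_of_mem_replicate hrep)
        exact hnd.1 (this ▸ List.mem_map_of_mem hg')
      simp [h0]
    · have hmem : g.1 ∈ t.map (fun g => g.1) := List.mem_map_of_mem hgt
      have hne : (h.1 == g.1) = false := by
        simp only [beq_eq_false_iff_ne, ne_eq]
        intro e; exact hnd.1 (e ▸ hmem)
      rw [List.count_replicate, hne, ih hnd.2 hgt]
      simp

-- sum swap: gathering lookups over codes = scattering each entry weighted by its multiplicity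
theorem pvGather_eq_scatter (l : List (String × Int)) (codes : List String)
    (hnd : (l.map (fun q => q.1)).Nodup) :
    codes.foldl (fun t s => t + (PySem.Dict.mk l).getD s 0) 0
      = (l.map (fun q => q.2 * ((codes.count q.1 : Nat) : Int))).sum := by
  rw [PySem.List.foldl_add, zero_add]
  induction l with
  | nil =>
    have h0 : ∀ s, (PySem.Dict.mk ([] : List (String × Int))).getD s 0 = 0 := fun s => rfl
    simp [h0]
  | cons p rest ih =>
    simp only [List.map_cons, List.nodup_cons] at hnd
    have hpt : ∀ s, (PySem.Dict.mk (p :: rest)).getD s 0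
        = (if p.1 == s then p.2 else 0) + (PySem.Dict.mk rest).getD s 0 := by
      intro s
      rw [PySem.Dict.getD_eq_get?_getD, PySem.Dict.get?_mk_cons]
      by_cases h : p.1 = s
      · subst h
        have hc : (PySem.Dict.mk rest).contains p.1 = false := by
          rw [PySem.Dict.contains_eq_decide_mem_keys]
          have hk : (PySem.Dict.mk rest).keys = rest.map (fun q => q.1) := rfl
          rw [hk]
          simpa using hnd.1
        rw [PySem.Dict.getD_of_not_contains _ _ hc]
        simp
      · have h' : (p.1 == s) = false := by simp [h]
        simp [h', PySem.Dict.getD_eq_get?_getD]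
    calc (codes.map (fun s => (PySem.Dict.mk (p :: rest)).getD s 0)).sum
        = (codes.map (fun s => (if p.1 == s then p.2 else 0) + (PySem.Dict.mk rest).getD s 0)).sum := by
          exact congrArg List.sum (List.map_congr_left (fun s _ => hpt s))
      _ = (codes.map (fun s => if p.1 == s then p.2 else 0)).sum
            + (codes.map (fun s => (PySem.Dict.mk rest).getD s 0)).sum :=
          pvSum_map_add codes _ _
      _ = p.2 * (codes.count p.1 : Int)
            + ((rest.map (fun q => q.2 * ((codes.count q.1 : Nat) : Int))).sum) := by
          rw [pvSum_map_ite, ih hnd.2]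
      _ = ((p :: rest).map (fun q => q.2 * ((codes.count q.1 : Nat) : Int))).sum := by
          simp

-- ===== VERDICT (by name: the statement is the Claim_ definition above) =====
theorem create_sa2_population_dict_spec : Claim_equal_create_sa2_population_dict := by
  intro pop grp _
  unfold Spec_create_sa2_population_dict
  simp only [create_sa2_population_dict, create_sa2_population_dict_alt]
  rw [PySem.List.foldl_prod_mk
      (f := fun (d : PySem.Dict String Int) (g : String × List String) => d.insert g.1 0)
      (g := fun (r : PySem.Dict String (List String)) (g : String × List String) =>
        g.2.foldl (fun r s => r.modify s [] (· ++ [g.1])) r)]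
  dsimp only
  set P := PySem.Dict.ofList pop with hP
  set G := PySem.Dict.ofList grp with hG
  have hGnd : (G.items.map (fun g => g.1)).Nodup := PySem.Dict.nodup_keys_ofList grp
  have hPnd : (P.items.map (fun q => q.1)).Nodup := PySem.Dict.nodup_keys_ofList pop
  have hA : (G.items.foldl (fun d g => d.insert g.1 (g.2.foldl (fun t s => t + P.getD s 0) 0)) PySem.Dict.empty).items
      = G.items.map (fun g => (g.1, g.2.foldl (fun t s => t + P.getD s 0) 0)) := by
    simpa using PySem.Dict.items_foldl_insert_fresh G.items (fun g => g.1)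
        (fun g => g.2.foldl (fun t s => t + P.getD s 0) 0) PySem.Dict.empty
        (fun a _ => PySem.Dict.contains_empty _) hGnd
  have hI : (G.items.foldl (fun (d : PySem.Dict String Int) g => d.insert g.1 0) PySem.Dict.empty).items
      = G.items.map (fun g => (g.1, (0 : Int))) := by
    simpa using PySem.Dict.items_foldl_insert_fresh G.items (fun g => g.1)
        (fun _ => (0 : Int)) PySem.Dict.empty
        (fun a _ => PySem.Dict.contains_empty _) hGnd
  set I := G.items.foldl (fun (d : PySem.Dict String Int) g => d.insert g.1 0) PySem.Dict.empty with hIdef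
  set R := G.items.foldl (fun r g => g.2.foldl (fun r s => r.modify s [] (· ++ [g.1])) r) PySem.Dict.empty with hRdef
  have hIkeys : I.keys = G.items.map (fun g => g.1) := by
    show I.items.map (fun p => p.1) = _
    rw [hI, List.map_map]
    rfl
  have hInd : I.keys.Nodup := by rw [hIkeys]; exact hGnd
  have hRget : ∀ s, R.getD s [] = G.items.flatMap (fun g => List.replicate (g.2.count s) g.1) := by
    intro s
    rw [hRdef, pvRev_getD]
    simp
  have hmem : ∀ q ∈ P.items, ∀ k ∈ R.getD q.1 [], k ∈ I.keys := by
    intro q _ k hk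
    rw [hRget] at hk
    rcases List.mem_flatMap.mp hk with ⟨g, hg, hrep⟩
    rw [hIkeys]
    exact (List.eq_of_mem_replicate hrep) ▸ List.mem_map_of_mem hg
  set F := P.items.foldl (fun d q => (R.getD q.1 []).foldl (fun d k => d.modify k 0 (· + q.2)) d) I with hFdef
  have hFkeys : F.keys = I.keys := pvScatterAll_keys P.items R I hmem
  have hFnd : F.keys.Nodup := hFkeys ▸ hInd
  rw [hA, PySem.Dict.items_eq_map_keys F hFnd 0, hFkeys, hIkeys, List.map_map]
  apply List.map_congr_left
  intro g hg
  simp only [Function.comp]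
  refine Prod.ext rfl ?_
  have hI0 : I.getD g.1 0 = 0 := by
    refine PySem.Dict.getD_of_mem_items I ?_ hInd 0
    rw [hI]
    exact List.mem_map_of_mem hg
  have hcnt : ∀ q : String × Int, (R.getD q.1 []).count g.1 = g.2.count q.1 := by
    intro q
    rw [hRget]
    exact pvCount_flatMap G.items g q.1 hGnd hg
  have hgather := pvGather_eq_scatter P.items g.2 hPnd
  have h2 : (P.items.map (fun q => q.2 * (((R.getD q.1 []).count g.1 : Nat) : Int))).sum
      = (P.items.map (fun q => q.2 * ((g.2.count q.1 : Nat) : Int))).sum :=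
    congrArg List.sum (List.map_congr_left (fun q _ => by rw [hcnt q]))
  rw [pvScatterAll_getD P.items R I g.1, hI0, zero_add, h2]
  exact hgather
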